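-- pv_equiv track=rewrite | github.com/nargesam/CS-ML-Basics | leetcodes/google/bricks_and_ropes.py | _can_walk
-- ===== SOURCE A (Python) =====
-- def _can_walk(buildings, ropes, bricks):
--
--     steps_needed = []
--     for i in range(len(buildings)-1):
--         if buildings[i] < buildings[i+1]:
--             steps_needed.append(buildings[i+1] - buildings[i])
--         else:
--             steps_needed.append(0)
--
--     steps_needed.sort()
--
--     if ropes >0:
--         steps_needed = steps_needed[:-ropes]
--
--     return sum(steps_needed) <=  bricks
-- ===== SOURCE B (Python) =====
-- def _can_walk(buildings, ropes, bricks):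
--     total = 0
--     gaps = []
--     for prev, cur in zip(buildings, buildings[1:]):
--         g = cur - prev if cur > prev else 0
--         total += g
--         gaps.append(g)
--     k = ropes if ropes > 0 else 0
--     return total - _sum_largest(gaps, k) <= bricks
--
--
-- def _sum_largest(xs, k):
--     # sum of the k largest elements of xs: iterative quickselect,
--     # middle pivot, three-way partition
--     acc = 0
--     while True:
--         if k <= 0 or not xs:
--             return acc
--         if k >= len(xs):
--             return acc + sum(xs)
--         p = xs[len(xs) // 2]
--         big = [x for x in xs if x > p]
--         if k <= len(big):
--             xs = big
--             continue
--         small = [x for x in xs if x < p]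
--         neq = len(xs) - len(big) - len(small)
--         if k <= len(big) + neq:
--             return acc + sum(big) + (k - len(big)) * p
--         acc += sum(big) + neq * p
--         k -= len(big) + neq
--         xs = small
-- ===== Notes on version B (the rewrite author's own statement) =====
-- stated objective: alternative
-- what changed: B replaces A's full sort of the gap list followed by slicing off the largest `ropes` entries with a single pass that builds the gap list and its total, then subtracts the sum of the `ropes` largest gaps computed by an iterative quickselect with three-way partitioning (no sorting).
import Mathlib
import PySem

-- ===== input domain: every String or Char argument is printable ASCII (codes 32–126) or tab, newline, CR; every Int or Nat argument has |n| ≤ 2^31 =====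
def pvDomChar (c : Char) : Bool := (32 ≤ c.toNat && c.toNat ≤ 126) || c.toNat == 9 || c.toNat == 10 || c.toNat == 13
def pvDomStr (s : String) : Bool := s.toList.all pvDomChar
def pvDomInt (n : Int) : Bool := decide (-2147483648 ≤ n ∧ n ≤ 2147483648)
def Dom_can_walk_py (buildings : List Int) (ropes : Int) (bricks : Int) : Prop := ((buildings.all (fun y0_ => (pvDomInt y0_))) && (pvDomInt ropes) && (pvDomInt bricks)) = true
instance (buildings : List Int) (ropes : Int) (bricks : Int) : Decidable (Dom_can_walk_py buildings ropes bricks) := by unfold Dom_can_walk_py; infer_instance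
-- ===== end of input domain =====

-- B replaces A's sort-then-slice over the gap list by a single pass that builds the gaps
-- and their total, then subtracts the sum of the `ropes` largest gaps found by a
-- quickselect-style three-way partition (objective: alternative algorithm, no sorting).

-- ===== PORT A =====
def can_walk_py (buildings : List Int) (ropes : Int) (bricks : Int) : Bool :=
  let steps_needed : List Int :=
    (PySem.List.pyRange 0 ((buildings.length : Int) - 1) 1).foldl
      (fun acc i =>
        if PySem.List.pyGetD buildings i 0 < PySem.List.pyGetD buildings (i + 1) 0 then
          acc ++ [PySem.List.pyGetD buildings (i + 1) 0 - PySem.List.pyGetD buildings i 0]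
        else
          acc ++ [0]) []
  let steps_needed := PySem.List.sorted steps_needed id false
  let steps_needed :=
    if ropes > 0 then PySem.List.slice steps_needed none (some (-ropes)) else steps_needed
  decide (steps_needed.sum ≤ bricks)

-- ===== PORT B =====
-- Source B's _sum_largest: iterative quickselect (middle pivot, three-way partition);
-- the while loop becomes the tail recursion sumLargestLoop carrying (xs, k, acc)
def sumLargestLoop (xs : List Int) (k acc : Int) : Int :=
  if h0 : k ≤ 0 ∨ xs = [] then acc
  else if (xs.length : Int) ≤ k then acc + xs.sum
  else
    let p := xs.getD (xs.length / 2) 0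
    let big := xs.filter (fun x => decide (p < x))
    if k ≤ (big.length : Int) then sumLargestLoop big k acc
    else
      let small := xs.filter (fun x => decide (x < p))
      let neq := xs.length - big.length - small.length
      if k ≤ (big.length : Int) + (neq : Int) then
        acc + big.sum + (k - (big.length : Int)) * p
      else
        sumLargestLoop small (k - (big.length : Int) - (neq : Int))
          (acc + big.sum + (neq : Int) * p)
  termination_by xs.length
  decreasing_by
  · have hne : xs ≠ [] := fun he => h0 (Or.inr he)
    have hlt : xs.length / 2 < xs.length :=
      Nat.div_lt_self (List.length_pos_of_ne_nil hne) (by norm_num)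
    have hp : xs.getD (xs.length / 2) 0 ∈ xs := by
      rw [List.getD_eq_getElem _ _ hlt]; exact List.getElem_mem hlt
    rw [List.length_unattach,
      List.filter_attach xs (fun x => decide (xs.getD (xs.length / 2) 0 < x)),
      List.length_map, List.length_attach]
    refine List.length_filter_lt_length_iff_exists.mpr ⟨xs.getD (xs.length / 2) 0, hp, ?_⟩
    simp
  · have hne : xs ≠ [] := fun he => h0 (Or.inr he)
    have hlt : xs.length / 2 < xs.length :=
      Nat.div_lt_self (List.length_pos_of_ne_nil hne) (by norm_num)
    have hp : xs.getD (xs.length / 2) 0 ∈ xs := by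
      rw [List.getD_eq_getElem _ _ hlt]; exact List.getElem_mem hlt
    rw [List.length_unattach,
      List.filter_attach xs (fun x => decide (x < xs.getD (xs.length / 2) 0)),
      List.length_map, List.length_attach]
    refine List.length_filter_lt_length_iff_exists.mpr ⟨xs.getD (xs.length / 2) 0, hp, ?_⟩
    simp

-- sum of the k largest elements of xs (Source B's _sum_largest entry: acc starts at 0)
def sumLargest (xs : List Int) (k : Int) : Int := sumLargestLoop xs k 0

def can_walk_py_alt (buildings : List Int) (ropes : Int) (bricks : Int) : Bool :=
  let st :=
    (buildings.zip (PySem.List.slice buildings (some 1) none)).foldl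
      (fun (acc : Int × List Int) pc =>
        let g := if pc.1 < pc.2 then pc.2 - pc.1 else 0
        (acc.1 + g, acc.2 ++ [g])) (0, [])
  let k := if ropes > 0 then ropes else 0
  decide (st.1 - sumLargest st.2 k ≤ bricks)

-- ===== PRECONDITION & SPEC =====
def Spec_can_walk_py (buildings : List Int) (ropes : Int) (bricks : Int) (out : Bool) : Prop := out = can_walk_py_alt buildings ropes bricks
instance (buildings : List Int) (ropes : Int) (bricks : Int) (out : Bool) : Decidable (Spec_can_walk_py buildings ropes bricks out) := by unfold Spec_can_walk_py; infer_instance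

-- ===== CLAIM (what is proved, stated in full; the proofs are below) =====
def Claim_equal_can_walk_py : Prop := ∀ (buildings : List Int) (ropes : Int) (bricks : Int), Dom_can_walk_py buildings ropes bricks → Spec_can_walk_py buildings ropes bricks (can_walk_py buildings ropes bricks)

-- ===== LEMMAS AND PROOFS =====

-- the gap list both programs build, in clean form
def gapsOf (buildings : List Int) : List Int :=
  (buildings.zip buildings.tail).map (fun pc => if pc.1 < pc.2 then pc.2 - pc.1 else 0)

theorem sumLargest_zero (xs : List Int) : sumLargest xs 0 = 0 := by
  unfold sumLargest
  rw [sumLargestLoop]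
  simp

-- two sorted-≤ permutations of the same Int list are equal
theorem sorted_unique {xs ys : List Int} (hp : ys.Perm xs)
    (hs : ys.Pairwise (· ≤ ·)) : PySem.List.sorted xs id false = ys := by
  have hperm : (PySem.List.sorted xs id false).Perm ys :=
    (PySem.List.sorted_perm xs id false).trans hp.symm
  refine hperm.eq_of_pairwise (le := (· ≤ ·)) ?_ ?_ ?_
  · exact fun a b _ _ h1 h2 => le_antisymm h1 h2
  · simpa using PySem.List.sorted_pairwise (xs := xs) (key := id)
  · exact hs

theorem sorted_nil_int : PySem.List.sorted ([] : List Int) id false = [] :=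
  List.Perm.eq_nil (PySem.List.sorted_perm [] id false)

-- the three-way partition counts add up to the length
theorem tri_count (p : Int) (xs : List Int) :
    (xs.filter (fun x => decide (x < p))).length + xs.count p +
      (xs.filter (fun x => decide (p < x))).length = xs.length := by
  induction xs with
  | nil => simp
  | cons a t iht =>
    simp only [List.filter_cons, List.count_cons, List.length_cons]
    rcases lt_trichotomy a p with h | h | h
    · have h1 : ¬ p < a := by omega
      have h2 : (a == p) = false := by simp; omega
      simp only [h, h1, h2, decide_true, decide_false, if_true, if_false, Bool.false_eq_true,
        List.length_cons]
      omega
    · subst h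
      simp only [lt_irrefl, decide_false, Bool.false_eq_true, if_false, BEq.rfl, if_true]
      omega
    · have h1 : ¬ a < p := by omega
      have h2 : (a == p) = false := by simp; omega
      simp only [h, h1, h2, decide_true, decide_false, if_true, if_false, Bool.false_eq_true,
        List.length_cons]
      omega

-- sorting splits as: everything below the pivot, the pivot's copies, everything above
theorem sorted_partition (p : Int) (xs : List Int) :
    PySem.List.sorted xs id false =
      PySem.List.sorted (xs.filter (fun x => decide (x < p))) id false ++
        List.replicate (xs.count p) p ++
        PySem.List.sorted (xs.filter (fun x => decide (p < x))) id false := by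
  apply sorted_unique
  · rw [List.perm_iff_count]
    intro a
    have hcs : ((PySem.List.sorted (xs.filter (fun x => decide (x < p))) id false).count a) =
        (xs.filter (fun x => decide (x < p))).count a :=
      (PySem.List.sorted_perm _ id false).count_eq a
    have hcb : ((PySem.List.sorted (xs.filter (fun x => decide (p < x))) id false).count a) =
        (xs.filter (fun x => decide (p < x))).count a :=
      (PySem.List.sorted_perm _ id false).count_eq a
    rw [List.count_append, List.count_append, hcs, hcb, List.count_replicate]
    rcases lt_trichotomy a p with h | h | h
    · have e1 : (xs.filter (fun x => decide (x < p))).count a = xs.count a :=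
        List.count_filter (by simpa using h)
      have e2 : (xs.filter (fun x => decide (p < x))).count a = 0 := by
        refine List.count_eq_zero.mpr (fun hm => ?_)
        have := (List.mem_filter.mp hm).2
        simp at this
        omega
      have e3 : (p == a) = false := by simp; omega
      simp [e1, e2, e3]
    · subst h
      have e1 : (xs.filter (fun x => decide (x < a))).count a = 0 := by
        refine List.count_eq_zero.mpr (fun hm => ?_)
        have := (List.mem_filter.mp hm).2
        simp at this
      have e2 : (xs.filter (fun x => decide (a < x))).count a = 0 := by
        refine List.count_eq_zero.mpr (fun hm => ?_)
        have := (List.mem_filter.mp hm).2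
        simp at this
      simp [e1, e2]
    · have e1 : (xs.filter (fun x => decide (x < p))).count a = 0 := by
        refine List.count_eq_zero.mpr (fun hm => ?_)
        have := (List.mem_filter.mp hm).2
        simp at this
        omega
      have e2 : (xs.filter (fun x => decide (p < x))).count a = xs.count a :=
        List.count_filter (by simpa using h)
      have e3 : (p == a) = false := by simp; omega
      simp [e1, e2, e3]
  · have hsmall : ∀ x ∈ PySem.List.sorted (xs.filter (fun x => decide (x < p))) id false, x < p := by
      intro x hx
      have := (PySem.List.mem_sorted _ _ _ _).mp hx
      simpa using (List.mem_filter.mp this).2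
    have hbig : ∀ x ∈ PySem.List.sorted (xs.filter (fun x => decide (p < x))) id false, p < x := by
      intro x hx
      have := (PySem.List.mem_sorted _ _ _ _).mp hx
      simpa using (List.mem_filter.mp this).2
    rw [List.pairwise_append]
    refine ⟨?_, ?_, ?_⟩
    · rw [List.pairwise_append]
      refine ⟨?_, List.pairwise_replicate.mpr (Or.inr le_rfl), ?_⟩
      · simpa using PySem.List.sorted_pairwise (xs := xs.filter (fun x => decide (x < p))) (key := id)
      · intro a ha b hb
        have := List.eq_of_mem_replicate hb
        subst this
        exact le_of_lt (hsmall a ha)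
    · simpa using PySem.List.sorted_pairwise (xs := xs.filter (fun x => decide (p < x))) (key := id)
    · intro a ha b hb
      have hbp := hbig b hb
      rcases List.mem_append.mp ha with h | h
      · exact le_of_lt (lt_trans (hsmall a h) hbp)
      · have := List.eq_of_mem_replicate h
        subst this
        exact le_of_lt hbp

-- key lemma: the quickselect loop adds the sum of the tail of the sorted list
theorem sumLargestLoop_eq : ∀ (n : Nat) (xs : List Int), xs.length = n →
    ∀ (k acc : Int), 0 ≤ k →
    sumLargestLoop xs k acc =
      acc + ((PySem.List.sorted xs id false).drop (xs.length - k.toNat)).sum := by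
  intro n
  induction n using Nat.strong_induction_on with
  | _ n ih =>
    intro xs hlen k acc hk
    rw [sumLargestLoop]
    by_cases h0 : k ≤ 0 ∨ xs = []
    · rw [dif_pos h0]
      rcases h0 with h0 | h0
      · have hk0 : k = 0 := le_antisymm h0 hk
        subst hk0
        simp [List.drop_eq_nil_of_le, PySem.List.length_sorted]
      · subst h0
        simp [sorted_nil_int]
    · rw [dif_neg h0]
      have hkpos : ¬ k ≤ 0 := fun h => h0 (Or.inl h)
      have hne : xs ≠ [] := fun h => h0 (Or.inr h)
      by_cases h1 : (xs.length : Int) ≤ k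
      · rw [if_pos h1]
        have hz : xs.length - k.toNat = 0 := by omega
        rw [hz, List.drop_zero, (PySem.List.sorted_perm xs id false).sum_eq]
      · rw [if_neg h1]
        simp only []
        set p := xs.getD (xs.length / 2) 0 with hpdef
        set big := xs.filter (fun x => decide (p < x)) with hbg
        set small := xs.filter (fun x => decide (x < p)) with hsm
        set c := xs.count p with hc
        have htri : small.length + c + big.length = xs.length := tri_count p xs
        have hneq : xs.length - big.length - small.length = c := by omega
        have hpart := sorted_partition p xs
        rw [← hbg, ← hsm, ← hc] at hpart
        have hlens : (PySem.List.sorted small id false).length = small.length :=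
          PySem.List.length_sorted _ _ _
        have hlenb : (PySem.List.sorted big id false).length = big.length :=
          PySem.List.length_sorted _ _ _
        have hl1 : (PySem.List.sorted small id false ++ List.replicate c p).length =
            small.length + c := by simp [hlens]
        have hkn : k.toNat < xs.length := by omega
        by_cases h2 : k ≤ (big.length : Int)
        · rw [if_pos h2]
          have hbl : big.length < n := by
            have : big.length ≤ xs.length := by omega
            have hblt : big.length < xs.length := by
              rw [hbg]
              refine List.length_filter_lt_length_iff_exists.mpr ⟨p, ?_, by simp⟩
              have hlt2 : xs.length / 2 < xs.length :=
                Nat.div_lt_self (List.length_pos_of_ne_nil hne) (by norm_num)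
              rw [hpdef, List.getD_eq_getElem _ _ hlt2]
              exact List.getElem_mem hlt2
            omega
          rw [ih big.length hbl big rfl k acc hk, hpart]
          have harith : xs.length - k.toNat =
              (PySem.List.sorted small id false ++ List.replicate c p).length +
                (big.length - k.toNat) := by
            rw [hl1]; omega
          rw [harith, List.drop_append, List.sum_append]
          have hnil : List.drop
              ((PySem.List.sorted small id false ++ List.replicate c p).length +
                (big.length - k.toNat))
              (PySem.List.sorted small id false ++ List.replicate c p) = [] :=
            List.drop_eq_nil_of_le (Nat.le_add_right _ _)
          rw [hnil, Nat.add_sub_cancel_left]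
          simp
        · rw [if_neg h2, hneq]
          by_cases h3 : k ≤ (big.length : Int) + (c : Int)
          · rw [if_pos h3, hpart]
            have hdle : xs.length - k.toNat ≤
                (PySem.List.sorted small id false ++ List.replicate c p).length := by
              rw [hl1]; omega
            have hdrop : List.drop (xs.length - k.toNat)
                (PySem.List.sorted small id false ++ List.replicate c p) =
                List.replicate (k.toNat - big.length) p := by
              rw [List.drop_append, List.drop_eq_nil_of_le (by rw [hlens]; omega),
                List.drop_replicate, List.nil_append]
              congr 1
              rw [hlens]; omega
            have hcast : ((k.toNat - big.length : Nat) : Int) = k - (big.length : Int) := by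
              omega
            rw [List.drop_append_of_le_length hdle, List.sum_append, hdrop, List.sum_replicate,
              nsmul_eq_mul, (PySem.List.sorted_perm big id false).sum_eq, hcast]
            ring
          · rw [if_neg h3]
            have hsl : small.length < n := by
              have hslt : small.length < xs.length := by
                rw [hsm]
                refine List.length_filter_lt_length_iff_exists.mpr ⟨p, ?_, by simp⟩
                have hlt2 : xs.length / 2 < xs.length :=
                  Nat.div_lt_self (List.length_pos_of_ne_nil hne) (by norm_num)
                rw [hpdef, List.getD_eq_getElem _ _ hlt2]
                exact List.getElem_mem hlt2
              omega
            rw [ih small.length hsl small rfl (k - (big.length : Int) - (c : Int))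
              (acc + big.sum + (c : Int) * p) (by omega), hpart]
            have hd : xs.length - k.toNat =
                small.length - (k - (big.length : Int) - (c : Int)).toNat := by
              omega
            have hdle2 : xs.length - k.toNat ≤ (PySem.List.sorted small id false).length := by
              rw [hlens]; omega
            have hdle : xs.length - k.toNat ≤
                (PySem.List.sorted small id false ++ List.replicate c p).length := by
              rw [hl1]; omega
            rw [List.drop_append_of_le_length hdle, List.drop_append_of_le_length hdle2,
              List.sum_append, List.sum_append, List.sum_replicate, nsmul_eq_mul,
              (PySem.List.sorted_perm big id false).sum_eq, ← hd]
            ring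

theorem sumLargest_eq (xs : List Int) (k : Int) (hk : 0 ≤ k) :
    sumLargest xs k =
      ((PySem.List.sorted xs id false).drop (xs.length - k.toNat)).sum := by
  unfold sumLargest
  rw [sumLargestLoop_eq xs.length xs rfl k 0 hk]
  ring

-- A's index loop builds exactly the zip-based gap list
theorem a_steps (buildings : List Int) :
    (PySem.List.pyRange 0 ((buildings.length : Int) - 1) 1).foldl
      (fun acc i =>
        if PySem.List.pyGetD buildings i 0 < PySem.List.pyGetD buildings (i + 1) 0 then
          acc ++ [PySem.List.pyGetD buildings (i + 1) 0 - PySem.List.pyGetD buildings i 0]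
        else
          acc ++ [0]) [] = gapsOf buildings := by
  rw [PySem.List.foldl_congr_mem _ _
      (fun acc i =>
        acc ++ [if PySem.List.pyGetD buildings i 0 < PySem.List.pyGetD buildings (i + 1) 0 then
          PySem.List.pyGetD buildings (i + 1) 0 - PySem.List.pyGetD buildings i 0 else 0])
      _ (by intro acc x _; beta_reduce; split_ifs <;> rfl)]
  rw [PySem.List.foldl_append_singleton_eq_map, List.nil_append]
  apply List.ext_getElem
  · simp [PySem.List.length_pyRange_one, gapsOf, List.length_zip]
  · intro j h1 h2
    have hj : (j : Int) < (buildings.length : Int) - 1 := by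
      simp [PySem.List.length_pyRange_one] at h1; omega
    have hjlt : j + 1 < buildings.length := by omega
    simp only [List.getElem_map]
    rw [PySem.List.getElem_pyRange_one]
    have e1 : PySem.List.pyGetD buildings ((0 : Int) + (j : Int)) 0 = buildings[j] := by
      rw [PySem.List.pyGetD_eq_getElem buildings 0 (by omega) (by omega)]
      congr 1
      omega
    have e2 : PySem.List.pyGetD buildings ((0 : Int) + (j : Int) + 1) 0 = buildings[j + 1] := by
      rw [PySem.List.pyGetD_eq_getElem buildings 0 (by omega) (by omega)]
      congr 1
      omega
    rw [e1, e2]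
    simp [gapsOf, List.getElem_zip, List.getElem_tail]

-- B's single pass returns the running total together with the gap list
theorem b_fold (g : Int × Int → Int) (l : List (Int × Int)) (s : Int) (acc : List Int) :
    l.foldl (fun (a : Int × List Int) pc => (a.1 + g pc, a.2 ++ [g pc])) (s, acc) =
      (s + (l.map g).sum, acc ++ l.map g) := by
  induction l generalizing s acc with
  | nil => simp
  | cons x t ihl => simp [ihl]; ring

-- ===== VERDICT (by name: the statement is the Claim_ definition above) =====
theorem can_walk_py_spec : Claim_equal_can_walk_py := by
  intro buildings ropes bricks _
  unfold Spec_can_walk_py can_walk_py can_walk_py_alt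
  rw [a_steps, PySem.List.slice_from_one,
    b_fold (fun pc => if pc.1 < pc.2 then pc.2 - pc.1 else 0) (buildings.zip buildings.tail) 0 []]
  simp only [List.nil_append, zero_add]
  set G := gapsOf buildings with hG
  have hmap : (buildings.zip buildings.tail).map
      (fun pc => if pc.1 < pc.2 then pc.2 - pc.1 else 0) = G := rfl
  rw [hmap]
  have hsortsum : (PySem.List.sorted G id false).sum = G.sum :=
    (PySem.List.sorted_perm G id false).sum_eq
  by_cases hr : ropes > 0
  · rw [if_pos hr, if_pos hr]
    have hneg : -ropes = -((ropes.toNat : Nat) : Int) := by omega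
    rw [hneg, PySem.List.slice_to_neg_natCast _ ropes.toNat (by omega)]
    have hlen : (PySem.List.sorted G id false).length = G.length :=
      PySem.List.length_sorted _ _ _
    rw [hlen]
    have hsplit : ((PySem.List.sorted G id false).take (G.length - ropes.toNat)).sum +
        ((PySem.List.sorted G id false).drop (G.length - ropes.toNat)).sum = G.sum := by
      rw [← List.sum_append, List.take_append_drop, hsortsum]
    have hsl := sumLargest_eq G ropes (by omega)
    rw [hsl]
    rw [decide_eq_decide]
    omega
  · rw [if_neg hr, if_neg hr]
    rw [sumLargest_zero, hsortsum]
    simp
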